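-- pv_equiv track=rewrite | github.com/blaxx6/UnifiedBotSystem | indic_speech_system/contact_style_extractor.py | _select_diverse_examples
-- ===== SOURCE A (Python) =====
-- def _select_diverse_examples(
--     pairs: list[tuple[str, str]], max_count: int = 8
-- ) -> list[tuple[str, str]]:
--     """Select diverse example pairs, avoiding duplicates and very similar ones."""
--     if len(pairs) <= max_count:
--         return pairs
--
--     selected = []
--     seen_replies = set()
--
--     for incoming, reply in pairs:
--         reply_lower = reply.lower().strip()
--         # Skip near-duplicates
--         if reply_lower in seen_replies:
--             continue
--         # Skip very short or uninformative replies
--         if len(reply.split()) < 2: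
--             continue
--         selected.append((incoming, reply))
--         seen_replies.add(reply_lower)
--         if len(selected) >= max_count:
--             break
--
--     # If we didn't get enough, add short ones too
--     if len(selected) < max_count:
--         for incoming, reply in pairs:
--             reply_lower = reply.lower().strip()
--             if reply_lower not in seen_replies:
--                 selected.append((incoming, reply))
--                 seen_replies.add(reply_lower)
--                 if len(selected) >= max_count:
--                     break
--
--     return selected
-- ===== SOURCE B (Python) =====
-- def _select_diverse_examples(
--     pairs: list[tuple[str, str]], max_count: int = 8
-- ) -> list[tuple[str, str]]:
--     """Single pass: partition first-occurrence replies into long/short, then slice."""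
--     if len(pairs) <= max_count:
--         return pairs
--
--     seen = set()
--     long_ones = []
--     short_ones = []
--     for incoming, reply in pairs:
--         key = reply.lower().strip()
--         if key in seen:
--             continue
--         seen.add(key)
--         if len(reply.split()) >= 2:
--             long_ones.append((incoming, reply))
--         else:
--             short_ones.append((incoming, reply))
--     return (long_ones + short_ones)[:max_count]
-- ===== Notes on version B (the rewrite author's own statement) =====
-- stated objective: simpler
-- what changed: Replaces A's two sequential filtered passes with shared early-break state by a single partition pass (one seen-set scan splitting first-occurrence replies into long/short buckets) followed by concatenation and one slice.
-- outside the precondition, e.g. on _select_diverse_examples([('a', 'hi there'), ('b', 'x')], 0): A returns [('a', 'hi there')], B returns []; on _select_diverse_examples([('a', 'x'), ('b', 'y')], -1): A returns [], B returns [('a', 'x')]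
import Mathlib
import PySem

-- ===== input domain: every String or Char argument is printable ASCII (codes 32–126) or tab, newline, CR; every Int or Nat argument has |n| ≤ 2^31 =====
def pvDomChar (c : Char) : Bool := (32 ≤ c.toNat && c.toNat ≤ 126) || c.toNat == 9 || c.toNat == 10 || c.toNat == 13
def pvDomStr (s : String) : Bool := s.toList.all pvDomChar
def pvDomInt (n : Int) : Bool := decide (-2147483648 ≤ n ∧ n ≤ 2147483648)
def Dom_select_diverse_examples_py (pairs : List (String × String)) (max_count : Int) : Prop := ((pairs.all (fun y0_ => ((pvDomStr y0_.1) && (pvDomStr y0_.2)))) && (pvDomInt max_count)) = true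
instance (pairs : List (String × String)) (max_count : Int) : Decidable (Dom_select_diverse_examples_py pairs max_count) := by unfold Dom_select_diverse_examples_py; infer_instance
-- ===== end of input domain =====

set_option maxHeartbeats 1000000


-- B replaces A's two sequential filtered passes (with shared early-break state) by a single
-- partition pass over the pairs followed by concatenation and one slice: a simpler decomposition.

-- ===== PORT A =====
-- first loop of A: select first occurrences of replies with >= 2 words, break at max_count
def pvPass1 : List (String × String) → List (String × String) → PySem.Set String → Int → List (String × String) × PySem.Set String
  | [], selected, seen, _ => (selected, seen)
  | (incoming, reply) :: rest, selected, seen, max_count =>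
    let reply_lower := PySem.Str.strip (PySem.Str.lower reply)
    if PySem.Set.contains seen reply_lower then
      pvPass1 rest selected seen max_count
    else if (PySem.Str.split₀ reply).length < 2 then
      pvPass1 rest selected seen max_count
    else
      let selected' := selected ++ [(incoming, reply)]
      let seen' := PySem.Set.add seen reply_lower
      if max_count ≤ (selected'.length : Int) then (selected', seen')
      else pvPass1 rest selected' seen' max_count

-- second loop of A: top up with not-yet-seen replies, break at max_count
def pvPass2 : List (String × String) → List (String × String) → PySem.Set String → Int → List (String × String)
  | [], selected, _, _ => selected
  | (incoming, reply) :: rest, selected, seen, max_count =>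
    let reply_lower := PySem.Str.strip (PySem.Str.lower reply)
    if PySem.Set.contains seen reply_lower then
      pvPass2 rest selected seen max_count
    else
      let selected' := selected ++ [(incoming, reply)]
      let seen' := PySem.Set.add seen reply_lower
      if max_count ≤ (selected'.length : Int) then selected'
      else pvPass2 rest selected' seen' max_count

def select_diverse_examples_py (pairs : List (String × String)) (max_count : Int) : List (String × String) :=
  if (pairs.length : Int) ≤ max_count then pairs
  else
    let r := pvPass1 pairs [] PySem.Set.empty max_count
    if (r.1.length : Int) < max_count then pvPass2 pairs r.1 r.2 max_count
    else r.1

-- ===== PORT B =====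
-- B's single loop: partition first-occurrence replies into long/short buckets
def pvPartition : List (String × String) → List (String × String) → List (String × String) → PySem.Set String → List (String × String) × List (String × String)
  | [], long_ones, short_ones, _ => (long_ones, short_ones)
  | (incoming, reply) :: rest, long_ones, short_ones, seen =>
    let key := PySem.Str.strip (PySem.Str.lower reply)
    if PySem.Set.contains seen key then
      pvPartition rest long_ones short_ones seen
    else
      let seen' := PySem.Set.add seen key
      if 2 ≤ (PySem.Str.split₀ reply).length then
        pvPartition rest (long_ones ++ [(incoming, reply)]) short_ones seen'
      else
        pvPartition rest long_ones (short_ones ++ [(incoming, reply)]) seen'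

def select_diverse_examples_py_alt (pairs : List (String × String)) (max_count : Int) : List (String × String) :=
  if (pairs.length : Int) ≤ max_count then pairs
  else
    let r := pvPartition pairs [] [] PySem.Set.empty
    PySem.List.slice (r.1 ++ r.2) none (some max_count)

-- ===== PRECONDITION & SPEC =====
-- Pre_ excludes non-positive max_count, outside the natural domain of a "select up to max_count"
-- cap (A's break-after-append still returns one element there, and B's Python slice reads a
-- negative max_count from the end); on all positive max_count the programs agree exactly.
def Pre_select_diverse_examples_py (pairs : List (String × String)) (max_count : Int) : Prop := 1 ≤ max_count
instance (pairs : List (String × String)) (max_count : Int) : Decidable (Pre_select_diverse_examples_py pairs max_count) := by unfold Pre_select_diverse_examples_py; infer_instance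
def pvWitness_select_diverse_examples_py : (List (String × String)) × Int := ([("a", "hi there"), ("b", "x")], 1)
def Spec_select_diverse_examples_py (pairs : List (String × String)) (max_count : Int) (out : List (String × String)) : Prop := out = select_diverse_examples_py_alt pairs max_count
instance (pairs : List (String × String)) (max_count : Int) (out : List (String × String)) : Decidable (Spec_select_diverse_examples_py pairs max_count out) := by unfold Spec_select_diverse_examples_py; infer_instance

-- ===== CLAIM (what is proved, stated in full; the proofs are below) =====
def Claim_equal_select_diverse_examples_py : Prop := ∀ (pairs : List (String × String)) (max_count : Int), Dom_select_diverse_examples_py pairs max_count → Pre_select_diverse_examples_py pairs max_count → Spec_select_diverse_examples_py pairs max_count (select_diverse_examples_py pairs max_count)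

-- ===== LEMMAS AND PROOFS =====

-- word-count machinery: pvWc s b = number of words of s, given we are (b) inside a word
def pvWc : List Char → Bool → Nat
  | [], b => if b then 1 else 0
  | c :: rest, b =>
    if PySem.Chars.isspace c then (if b then 1 + pvWc rest false else pvWc rest false)
    else pvWc rest true

theorem pvGo_length (s : List Char) : ∀ (cur : List Char) (acc : List (List Char)),
    (PySem.Chars.split₀.go s cur acc).length = acc.length + pvWc s (!cur.isEmpty) := by
  induction s with
  | nil =>
    intro cur acc
    simp only [PySem.Chars.split₀.go, pvWc]
    cases cur <;> simp
  | cons c rest ih =>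
    intro cur acc
    simp only [PySem.Chars.split₀.go, pvWc]
    by_cases hs : PySem.Chars.isspace c = true
    · rcases cur with _ | ⟨d, cur⟩ <;> simp [hs, ih] <;> omega
    · simp only [Bool.not_eq_true] at hs
      simp [hs, ih]

theorem pvSplit₀_length (s : List Char) : (PySem.Chars.split₀ s).length = pvWc s false := by
  simpa using pvGo_length s [] []

theorem pvIsspace_false {c : Char} (h1 : 65 ≤ c.toNat) (h2 : c.toNat ≤ 122) :
    PySem.Chars.isspace c = false := by
  unfold PySem.Chars.isspace
  simp only [Bool.or_eq_false_iff, Bool.and_eq_false_iff, decide_eq_false_iff_not]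
  omega

theorem pvIsspace_lowerChar (c : Char) :
    PySem.Chars.isspace (PySem.Chars.lowerChar c) = PySem.Chars.isspace c := by
  unfold PySem.Chars.lowerChar
  by_cases h : PySem.Chars.isupper c = true
  · rw [if_pos h]
    unfold PySem.Chars.isupper at h
    simp only [Bool.and_eq_true, decide_eq_true_eq, Char.le_def, UInt32.le_iff_toNat_le] at h
    have hAZ : ('A'.val.toNat = 65) ∧ ('Z'.val.toNat = 90) := by decide
    have hv : 65 ≤ c.toNat ∧ c.toNat ≤ 90 := by unfold Char.toNat; omega
    have h2 : (Char.ofNat (c.toNat + 32)).toNat = c.toNat + 32 := by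
      rw [Char.toNat_ofNat, if_pos]; left; omega
    rw [pvIsspace_false (by omega) (by omega), pvIsspace_false hv.1 (by omega)]
  · rw [if_neg h]

theorem pvWc_lower (s : List Char) : ∀ b, pvWc (PySem.Chars.lower s) b = pvWc s b := by
  induction s with
  | nil => intro b; rfl
  | cons c rest ih =>
    intro b
    simp only [PySem.Chars.lower] at ih ⊢
    simp only [List.map_cons, pvWc, pvIsspace_lowerChar]
    by_cases hs : PySem.Chars.isspace c = true <;> simp [hs, ih]

theorem pvWc_all_space {t : List Char} (h : ∀ c ∈ t, PySem.Chars.isspace c = true) :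
    ∀ b, pvWc t b = if b then 1 else 0 := by
  induction t with
  | nil => intro b; rfl
  | cons c rest ih =>
    intro b
    have hc := h c (by simp)
    simp only [pvWc, hc, if_true]
    have := ih (fun c hc => h c (by simp [hc])) false
    cases b <;> simp [this]

theorem pvWc_append_spaces {t : List Char} (h : ∀ c ∈ t, PySem.Chars.isspace c = true)
    (s : List Char) : ∀ b, pvWc (s ++ t) b = pvWc s b := by
  induction s with
  | nil => intro b; simp [pvWc, pvWc_all_space h b]
  | cons c rest ih =>
    intro b
    simp only [List.cons_append, pvWc]
    by_cases hs : PySem.Chars.isspace c <;> simp [hs, ih]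

theorem pvWc_lstrip (s : List Char) : pvWc (PySem.Chars.lstrip s) false = pvWc s false := by
  unfold PySem.Chars.lstrip
  induction s with
  | nil => rfl
  | cons c rest ih =>
    by_cases hs : PySem.Chars.isspace c <;> simp [List.dropWhile, hs, pvWc, ih]

theorem pvWc_rstrip (s : List Char) : pvWc (PySem.Chars.rstrip s) false = pvWc s false := by
  unfold PySem.Chars.rstrip
  have hdecomp : (List.dropWhile PySem.Chars.isspace s.reverse).reverse
      ++ (List.takeWhile PySem.Chars.isspace s.reverse).reverse = s := by
    rw [← List.reverse_append, List.takeWhile_append_dropWhile, List.reverse_reverse]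
  have hsp : ∀ c ∈ (List.takeWhile PySem.Chars.isspace s.reverse).reverse,
      PySem.Chars.isspace c = true := by
    intro c hc
    exact List.mem_takeWhile_imp (List.mem_reverse.mp hc)
  conv_rhs => rw [← hdecomp]
  rw [pvWc_append_spaces hsp _ false]

-- THE LINK: the word count of a reply equals the word count of its lowered-and-stripped key
theorem pvLink (r : String) :
    (PySem.Str.split₀ (PySem.Str.strip (PySem.Str.lower r))).length = (PySem.Str.split₀ r).length := by
  have h1 : ∀ x : String, (PySem.Str.split₀ x).length = pvWc x.toList false := by
    intro x
    rw [← pvSplit₀_length, ← PySem.Str.split₀_map_toList, List.length_map]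
  rw [h1, h1, PySem.Str.toList_strip, PySem.Str.toList_lower]
  unfold PySem.Chars.strip
  rw [pvWc_rstrip, pvWc_lstrip, pvWc_lower]

-- key / bucket abstractions used by the proofs
def pvKey (r : String) : String := PySem.Str.strip (PySem.Str.lower r)

theorem pvKey_def (r : String) : PySem.Str.strip (PySem.Str.lower r) = pvKey r := rfl
def pvLongK (k : String) : Bool := decide (2 ≤ (PySem.Str.split₀ k).length)
def pvLong (p : String × String) : Bool := pvLongK (pvKey p.2)

theorem pvLong_iff (i r : String) : pvLong (i, r) = true ↔ 2 ≤ (PySem.Str.split₀ r).length := by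
  simp [pvLong, pvLongK, pvKey, pvLink]

-- first-occurrence scan: the pairs whose key is new, together with the final seen set
def pvScan : List (String × String) → PySem.Set String → List (String × String) × PySem.Set String
  | [], seen => ([], seen)
  | (i, r) :: rest, seen =>
    if pvKey r ∈ seen then pvScan rest seen
    else
      let q := pvScan rest (PySem.Set.add seen (pvKey r))
      ((i, r) :: q.1, q.2)

theorem pvScan_seen_mem : ∀ (rest : List (String × String)) (s : PySem.Set String) (k : String),
    k ∈ (pvScan rest s).2 ↔ k ∈ s ∨ ∃ p ∈ rest, pvKey p.2 = k := by
  intro rest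
  induction rest with
  | nil => intro s k; simp [pvScan]
  | cons p rest ih =>
    intro s k
    obtain ⟨i, r⟩ := p
    simp only [pvScan]
    by_cases h : pvKey r ∈ s
    · rw [if_pos h, ih]
      constructor
      · rintro (hk | hk)
        · exact Or.inl hk
        · exact Or.inr (by simpa using Or.inr hk)
      · rintro (hk | hk)
        · exact Or.inl hk
        · rcases (by simpa using hk : pvKey r = k ∨ ∃ p ∈ rest, pvKey p.2 = k) with h' | h'
          · exact Or.inl (h' ▸ h)
          · exact Or.inr h'
    · rw [if_neg h]
      simp only [ih, PySem.Set.mem_add]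
      constructor
      · rintro ((hk | hk) | hk)
        · exact Or.inl hk
        · exact Or.inr ⟨(i, r), by simp [hk]⟩
        · rcases hk with ⟨p, hp, hpk⟩; exact Or.inr ⟨p, by simp [hp], hpk⟩
      · rintro (hk | hk)
        · exact Or.inl (Or.inl hk)
        · rcases hk with ⟨p, hp, hpk⟩
          rcases (by simpa using hp : p = (i, r) ∨ p ∈ rest) with h' | h'
          · subst h'; exact Or.inl (Or.inr hpk.symm)
          · exact Or.inr ⟨p, h', hpk⟩

-- B's loop is the scan, filtered into the two buckets
theorem pvPB : ∀ (rest L S : List (String × String)) (seen : PySem.Set String),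
    pvPartition rest L S seen =
      (L ++ (pvScan rest seen).1.filter pvLong,
       S ++ (pvScan rest seen).1.filter (fun p => ! pvLong p)) := by
  intro rest
  induction rest with
  | nil => intro L S seen; simp [pvPartition, pvScan]
  | cons p rest ih =>
    intro L S seen
    obtain ⟨i, r⟩ := p
    simp only [pvPartition, pvScan, pvKey_def]
    by_cases hk : pvKey r ∈ seen
    · rw [if_pos ((PySem.Set.contains_iff seen (pvKey r)).mpr hk), if_pos hk]
      exact ih L S seen
    · rw [if_neg (fun h => hk ((PySem.Set.contains_iff seen (pvKey r)).mp h)), if_neg hk]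
      by_cases hl : 2 ≤ (PySem.Str.split₀ r).length
      · have hfilter : pvLong (i, r) = true := (pvLong_iff i r).mpr hl
        rw [if_pos hl, ih]
        simp [hfilter]
      · have hfilter : pvLong (i, r) = false := by
          rw [← Bool.not_eq_true, pvLong_iff]; omega
        rw [if_neg hl, ih]
        simp [hfilter]

-- reduction equations for one step of the loops (kept small so rewriting stays cheap)
theorem pvScan_skip (i r : String) (rest : List (String × String)) (seen : PySem.Set String)
    (h : pvKey r ∈ seen) : pvScan ((i, r) :: rest) seen = pvScan rest seen := by
  simp only [pvScan]
  rw [if_pos h]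

theorem pvScan_pick (i r : String) (rest : List (String × String)) (seen : PySem.Set String)
    (h : pvKey r ∉ seen) :
    pvScan ((i, r) :: rest) seen =
      ((i, r) :: (pvScan rest (PySem.Set.add seen (pvKey r))).1,
       (pvScan rest (PySem.Set.add seen (pvKey r))).2) := by
  simp only [pvScan]
  rw [if_neg h]

theorem pvPass1_skip_seen (i r : String) (rest sel : List (String × String))
    (seen : PySem.Set String) (mc : Int) (h : pvKey r ∈ seen) :
    pvPass1 ((i, r) :: rest) sel seen mc = pvPass1 rest sel seen mc := by
  simp only [pvPass1, pvKey_def]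
  rw [if_pos ((PySem.Set.contains_iff seen (pvKey r)).mpr h)]

theorem pvPass1_skip_short (i r : String) (rest sel : List (String × String))
    (seen : PySem.Set String) (mc : Int) (h1 : pvKey r ∉ seen)
    (h2 : (PySem.Str.split₀ r).length < 2) :
    pvPass1 ((i, r) :: rest) sel seen mc = pvPass1 rest sel seen mc := by
  simp only [pvPass1, pvKey_def]
  rw [if_neg (fun h => h1 ((PySem.Set.contains_iff seen (pvKey r)).mp h)), if_pos h2]

theorem pvPass1_take (i r : String) (rest sel : List (String × String))
    (seen : PySem.Set String) (mc : Int) (h1 : pvKey r ∉ seen)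
    (h2 : ¬ (PySem.Str.split₀ r).length < 2) (h3 : mc ≤ ((sel ++ [(i, r)]).length : Int)) :
    pvPass1 ((i, r) :: rest) sel seen mc = (sel ++ [(i, r)], PySem.Set.add seen (pvKey r)) := by
  simp only [pvPass1, pvKey_def]
  rw [if_neg (fun h => h1 ((PySem.Set.contains_iff seen (pvKey r)).mp h)), if_neg h2, if_pos h3]

theorem pvPass1_go (i r : String) (rest sel : List (String × String))
    (seen : PySem.Set String) (mc : Int) (h1 : pvKey r ∉ seen)
    (h2 : ¬ (PySem.Str.split₀ r).length < 2) (h3 : ¬ mc ≤ ((sel ++ [(i, r)]).length : Int)) :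
    pvPass1 ((i, r) :: rest) sel seen mc
      = pvPass1 rest (sel ++ [(i, r)]) (PySem.Set.add seen (pvKey r)) mc := by
  simp only [pvPass1, pvKey_def]
  rw [if_neg (fun h => h1 ((PySem.Set.contains_iff seen (pvKey r)).mp h)), if_neg h2, if_neg h3]

-- A's first pass is the long bucket truncated at max_count
theorem pvP1 (mc : Int) : ∀ (rest sel : List (String × String)) (seen seenB : PySem.Set String),
    (∀ k, k ∈ seen ↔ (k ∈ seenB ∧ pvLongK k = true)) → (sel.length : Int) < mc →
    (pvPass1 rest sel seen mc).1 = (sel ++ (pvScan rest seenB).1.filter pvLong).take mc.toNat ∧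
    (((sel ++ (pvScan rest seenB).1.filter pvLong).length : Int) < mc →
      ∀ k, k ∈ (pvPass1 rest sel seen mc).2 ↔ (k ∈ (pvScan rest seenB).2 ∧ pvLongK k = true)) := by
  intro rest
  induction rest with
  | nil =>
    intro sel seen seenB hR hlen
    simp only [pvPass1, pvScan, List.filter_nil, List.append_nil]
    exact ⟨(List.take_of_length_le (by omega)).symm, fun _ => hR⟩
  | cons p rest ih =>
    intro sel seen seenB hR hlen
    obtain ⟨i, r⟩ := p
    by_cases hk : pvKey r ∈ seen
    · have hkB := (hR _).mp hk
      rw [pvPass1_skip_seen i r rest sel seen mc hk, pvScan_skip i r rest seenB hkB.1]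
      exact ih sel seen seenB hR hlen
    · by_cases hl : 2 ≤ (PySem.Str.split₀ r).length
      · -- long pair, new key: also not in seenB
        have hlk : pvLongK (pvKey r) = true := (pvLong_iff i r).mpr hl
        have hkB : pvKey r ∉ seenB := fun h => hk ((hR _).mpr ⟨h, hlk⟩)
        rw [pvScan_pick i r rest seenB hkB,
            List.filter_cons_of_pos (show pvLong (i, r) = true from hlk)]
        by_cases hbrk : mc ≤ ((sel ++ [(i, r)]).length : Int)
        · rw [pvPass1_take i r rest sel seen mc hk (by omega) hbrk]
          have hmc : mc.toNat = (sel ++ [(i, r)]).length := by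
            simp only [List.length_append, List.length_cons, List.length_nil] at hbrk ⊢
            omega
          constructor
          · rw [hmc, show sel ++ (i, r) :: List.filter pvLong (pvScan rest (PySem.Set.add seenB (pvKey r))).1
                  = (sel ++ [(i, r)]) ++ List.filter pvLong (pvScan rest (PySem.Set.add seenB (pvKey r))).1 from
                  by rw [List.append_assoc, List.singleton_append], List.take_left]
          · intro hlen2
            exfalso
            simp only [List.length_append, List.length_cons, List.length_nil] at hlen2 hbrk
            omega
        · rw [pvPass1_go i r rest sel seen mc hk (by omega) hbrk]
          have hR' : ∀ k, k ∈ PySem.Set.add seen (pvKey r) ↔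
              (k ∈ PySem.Set.add seenB (pvKey r) ∧ pvLongK k = true) := by
            intro k
            rw [PySem.Set.mem_add, PySem.Set.mem_add, hR k]
            constructor
            · rintro (⟨h1, h2⟩ | h1)
              · exact ⟨Or.inl h1, h2⟩
              · exact ⟨Or.inr h1, h1 ▸ hlk⟩
            · rintro ⟨h1 | h1, h2⟩
              · exact Or.inl ⟨h1, h2⟩
              · exact Or.inr h1
          have hlen' : (((sel ++ [(i, r)]).length : Nat) : Int) < mc := by omega
          obtain ⟨ih1, ih2⟩ := ih (sel ++ [(i, r)]) _ _ hR' hlen'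
          constructor
          · rw [ih1, List.append_assoc, List.singleton_append]
          · intro hlen2
            apply ih2
            simp only [List.length_append, List.length_cons, List.length_nil] at hlen2 ⊢
            omega
      · -- short pair: A skips it
        have hlk : pvLongK (pvKey r) = false := by
          rw [← Bool.not_eq_true]
          intro h
          exact hl ((pvLong_iff i r).mp h)
        rw [pvPass1_skip_short i r rest sel seen mc hk (by omega)]
        by_cases hkB : pvKey r ∈ seenB
        · rw [pvScan_skip i r rest seenB hkB]
          exact ih sel seen seenB hR hlen
        · rw [pvScan_pick i r rest seenB hkB,
              List.filter_cons_of_neg (by simp [show pvLong (i, r) = false from hlk])]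
          refine ih sel seen (PySem.Set.add seenB (pvKey r)) ?_ hlen
          intro k
          rw [hR k, PySem.Set.mem_add]
          constructor
          · rintro ⟨h1, h2⟩
            exact ⟨Or.inl h1, h2⟩
          · rintro ⟨h1 | h1, h2⟩
            · exact ⟨h1, h2⟩
            · exact absurd h2 (by rw [h1, hlk]; simp)

-- A's second pass appends the scan of the remaining (short) keys, truncated at max_count
theorem pvP2 (mc : Int) : ∀ (rest sel : List (String × String)) (seen : PySem.Set String),
    (sel.length : Int) < mc →
    (∀ p ∈ rest, pvLong p = true → pvKey p.2 ∈ seen) →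
    pvPass2 rest sel seen mc = (sel ++ (pvScan rest seen).1).take mc.toNat := by
  intro rest
  induction rest with
  | nil =>
    intro sel seen hlen _
    simp only [pvPass2, pvScan, List.append_nil]
    exact (List.take_of_length_le (by omega)).symm
  | cons p rest ih =>
    intro sel seen hlen hL
    obtain ⟨i, r⟩ := p
    simp only [pvPass2, pvScan, pvKey_def]
    by_cases hk : pvKey r ∈ seen
    · rw [if_pos ((PySem.Set.contains_iff seen (pvKey r)).mpr hk), if_pos hk]
      exact ih sel seen hlen (fun p hp => hL p (by simp [hp]))
    · rw [if_neg (fun h => hk ((PySem.Set.contains_iff seen (pvKey r)).mp h)), if_neg hk]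
      by_cases hbrk : mc ≤ ((sel ++ [(i, r)]).length : Int)
      · rw [if_pos hbrk]
        have hmc : mc.toNat = (sel ++ [(i, r)]).length := by
          simp only [List.length_append, List.length_cons, List.length_nil] at hbrk ⊢
          omega
        rw [show sel ++ (i, r) :: (pvScan rest (PySem.Set.add seen (pvKey r))).1
              = (sel ++ [(i, r)]) ++ (pvScan rest (PySem.Set.add seen (pvKey r))).1 by simp,
            hmc, List.take_left]
      · rw [if_neg hbrk]
        have hlen' : (((sel ++ [(i, r)]).length : Nat) : Int) < mc := by omega
        have hL' : ∀ p ∈ rest, pvLong p = true → pvKey p.2 ∈ PySem.Set.add seen (pvKey r) :=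
          fun p hp hpl => (PySem.Set.mem_add _ _ _).mpr (Or.inl (hL p (by simp [hp]) hpl))
        rw [ih (sel ++ [(i, r)]) (PySem.Set.add seen (pvKey r)) hlen' hL']
        congr 1
        simp

-- scanning with all long keys pre-seen picks exactly the short part of the full scan
theorem pvSC : ∀ (rest : List (String × String)) (s t : PySem.Set String),
    (∀ p ∈ rest, pvLong p = true → pvKey p.2 ∈ s) →
    (∀ k, pvLongK k = false → (k ∈ s ↔ k ∈ t)) →
    (pvScan rest s).1 = ((pvScan rest t).1).filter (fun p => ! pvLong p) := by
  intro rest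
  induction rest with
  | nil => intro s t _ _; simp [pvScan]
  | cons p rest ih =>
    intro s t hs hst
    obtain ⟨i, r⟩ := p
    simp only [pvScan]
    by_cases hl : pvLong (i, r) = true
    · -- long pair: its key is already in s
      have hks : pvKey r ∈ s := hs (i, r) (by simp) hl
      rw [if_pos hks]
      by_cases hkt : pvKey r ∈ t
      · rw [if_pos hkt]
        exact ih s t (fun p hp => hs p (by simp [hp])) hst
      · rw [if_neg hkt]
        simp only [List.filter_cons, hl, Bool.not_true]
        rw [if_neg (by simp)]
        refine ih s (PySem.Set.add t (pvKey r)) (fun p hp => hs p (by simp [hp])) ?_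
        intro k hk
        rw [hst k hk, PySem.Set.mem_add]
        constructor
        · exact Or.inl
        · rintro (h | h)
          · exact h
          · exact absurd hl (by rw [h] at hk; simp [pvLong, hk])
    · rw [Bool.not_eq_true] at hl
      have hmem : pvKey r ∈ s ↔ pvKey r ∈ t := hst _ hl
      by_cases hks : pvKey r ∈ s
      · rw [if_pos hks, if_pos (hmem.mp hks)]
        exact ih s t (fun p hp => hs p (by simp [hp])) hst
      · rw [if_neg hks, if_neg (fun h => hks (hmem.mpr h))]
        simp only [List.filter_cons, hl, Bool.not_false, if_pos trivial]
        refine congrArg _ ?_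
        refine ih (PySem.Set.add s (pvKey r)) (PySem.Set.add t (pvKey r)) ?_ ?_
        · intro p hp hpl
          exact (PySem.Set.mem_add _ _ _).mpr (Or.inl (hs p (by simp [hp]) hpl))
        · intro k hk
          rw [PySem.Set.mem_add, PySem.Set.mem_add, hst k hk]

-- ===== VERDICT (by name: the statement is the Claim_ definition above) =====
theorem select_diverse_examples_py_spec : Claim_equal_select_diverse_examples_py := by
  intro pairs mc _ hpre
  unfold Pre_select_diverse_examples_py at hpre
  unfold Spec_select_diverse_examples_py select_diverse_examples_py select_diverse_examples_py_alt
  by_cases hle : (pairs.length : Int) ≤ mc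
  · rw [if_pos hle, if_pos hle]
  · rw [if_neg hle, if_neg hle]
    show (if ((pvPass1 pairs [] PySem.Set.empty mc).1.length : Int) < mc then
            pvPass2 pairs (pvPass1 pairs [] PySem.Set.empty mc).1 (pvPass1 pairs [] PySem.Set.empty mc).2 mc
          else (pvPass1 pairs [] PySem.Set.empty mc).1)
        = PySem.List.slice ((pvPartition pairs [] [] PySem.Set.empty).1
            ++ (pvPartition pairs [] [] PySem.Set.empty).2) none (some mc)
    rw [pvPB pairs [] [] PySem.Set.empty]
    simp only [List.nil_append]
    rw [PySem.List.slice_to _ (by omega : (0 : Int) ≤ mc)]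
    have hR0 : ∀ k : String, k ∈ (PySem.Set.empty : PySem.Set String) ↔
        (k ∈ (PySem.Set.empty : PySem.Set String) ∧ pvLongK k = true) := by
      intro k
      simp [PySem.Set.empty]
    obtain ⟨h11, h12⟩ := pvP1 mc pairs [] PySem.Set.empty PySem.Set.empty hR0
      (by simp only [List.length_nil, Int.natCast_zero]; omega)
    simp only [List.nil_append] at h11 h12
    by_cases hcase : ((List.filter pvLong (pvScan pairs PySem.Set.empty).1).length : Int) < mc
    · -- pass 1 selected all long first occurrences
      have htake : (List.filter pvLong (pvScan pairs PySem.Set.empty).1).take mc.toNat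
          = List.filter pvLong (pvScan pairs PySem.Set.empty).1 :=
        List.take_of_length_le (by omega)
      have hseen := h12 hcase
      have hL : ∀ p ∈ pairs, pvLong p = true →
          pvKey p.2 ∈ (pvPass1 pairs [] PySem.Set.empty mc).2 := by
        intro p hp hlp
        rw [hseen]
        exact ⟨(pvScan_seen_mem pairs PySem.Set.empty _).mpr (Or.inr ⟨p, hp, rfl⟩), hlp⟩
      rw [if_pos (by rw [h11, htake]; exact hcase), h11, htake,
          pvP2 mc pairs (List.filter pvLong (pvScan pairs PySem.Set.empty).1)
            (pvPass1 pairs [] PySem.Set.empty mc).2 hcase hL,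
          pvSC pairs (pvPass1 pairs [] PySem.Set.empty mc).2 PySem.Set.empty hL
            (by intro k hkf; rw [hseen k]; simp [hkf, PySem.Set.empty])]
    · -- pass 1 broke at max_count: the long bucket alone already fills the result
      have hlen1 : (pvPass1 pairs [] PySem.Set.empty mc).1.length = mc.toNat := by
        rw [h11]
        simp only [List.length_take]
        omega
      rw [if_neg (by rw [hlen1]; omega), h11,
          List.take_append_of_le_length (by omega)]
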